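-- pv_equiv track=rewrite | github.com/101rror/GeeksforGeeks | Difficulty: Medium/Special Keyboard/special-keyboard.py | optimalKeys
-- ===== SOURCE A (Python) =====
-- def optimalKeys(n: int) -> int:
--     if n <= 6:
--         return n
--
--     dp = [0] * (n + 1)
--
--     for i in range(1, 7):
--         dp[i] = i
--
--     for i in range(7, n + 1):
--         for j in range(i - 3, 0, -1):
--             curr = dp[j] * (i - j - 1)
--             dp[i] = max(dp[i], curr)
--
--     return dp[n]
-- ===== SOURCE B (Python) =====
-- def optimalKeys(n: int) -> int:
--     if n <= 6:
--         return n
--     # rolling window of the last five dp values dp[i-5..i-1]; for i >= 7 the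
--     # optimal last break point is always j = i-4 or j = i-5, so
--     # dp[i] = max(3*dp[i-4], 4*dp[i-5]).
--     a, b, c, d, e = 2, 3, 4, 5, 6
--     for _ in range(7, n + 1):
--         a, b, c, d, e = b, c, d, e, max(3 * b, 4 * a)
--     return e
-- ===== Notes on version B (the rewrite author's own statement) =====
-- stated objective: faster
-- what changed: Replaces the quadratic dp over a full array with inner scan of all break points by an O(1)-space rolling five-value window using the proved fact that only the break points j=i-4 and j=i-5 matter (dp[i]=max(3*dp[i-4],4*dp[i-5])).
import Mathlib
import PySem

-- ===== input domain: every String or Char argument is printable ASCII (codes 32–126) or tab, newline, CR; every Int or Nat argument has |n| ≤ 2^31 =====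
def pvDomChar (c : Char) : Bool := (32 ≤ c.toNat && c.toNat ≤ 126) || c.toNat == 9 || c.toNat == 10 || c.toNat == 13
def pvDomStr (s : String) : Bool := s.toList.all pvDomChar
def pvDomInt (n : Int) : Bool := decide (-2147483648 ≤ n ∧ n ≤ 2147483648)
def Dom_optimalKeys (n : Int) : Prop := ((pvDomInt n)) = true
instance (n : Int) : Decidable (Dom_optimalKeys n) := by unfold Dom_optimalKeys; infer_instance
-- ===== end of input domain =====

-- B replaces A's quadratic dp (full array, inner scan over every break point) by a rolling
-- five-value window using dp[i] = max(3*dp[i-4], 4*dp[i-5]); objective: faster.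

-- ===== PORT A =====
-- Literal transliteration of A. All list indices (1..6, j in 1..i-3, i in 7..n, and n itself)
-- are nonnegative and < len(dp) = n+1, so pyGetD _ _ 0 / pySetD are exact (Python never raises here).
def optimalKeys (n : Int) : Int :=
  if n ≤ 6 then n
  else
    let dp : List Int := List.replicate (n + 1).toNat 0
    let dp := (PySem.List.pyRange 1 7 1).foldl (fun dp i => PySem.List.pySetD dp i i) dp
    let dp := (PySem.List.pyRange 7 (n + 1) 1).foldl (fun dp i =>
      (PySem.List.pyRange (i - 3) 0 (-1)).foldl (fun dp j =>
        let curr := PySem.List.pyGetD dp j 0 * (i - j - 1)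
        PySem.List.pySetD dp i (max (PySem.List.pyGetD dp i 0) curr)) dp) dp
    PySem.List.pyGetD dp n 0

-- ===== PORT B =====
-- Literal transliteration of B (Source B): rolling window (a,b,c,d,e) = (dp[i-5],…,dp[i-1]).
def optimalKeys_alt (n : Int) : Int :=
  if n ≤ 6 then n
  else
    let s := (PySem.List.pyRange 7 (n + 1) 1).foldl
      (fun (s : Int × Int × Int × Int × Int) _ =>
        match s with
        | (a, b, c, d, e) => (b, c, d, e, max (3 * b) (4 * a)))
      (2, 3, 4, 5, 6)
    s.2.2.2.2

-- ===== PRECONDITION & SPEC =====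
def Spec_optimalKeys (n : Int) (out : Int) : Prop := out = optimalKeys_alt n
instance (n : Int) (out : Int) : Decidable (Spec_optimalKeys n out) := by unfold Spec_optimalKeys; infer_instance

-- ===== CLAIM (what is proved, stated in full; the proofs are below) =====
def Claim_equal_optimalKeys : Prop := ∀ (n : Int), Dom_optimalKeys n → Spec_optimalKeys n (optimalKeys n)

-- ===== LEMMAS AND PROOFS =====

-- The value both programs compute at index k: the dp table of the special-keyboard problem,
-- in the two-break-point form B uses.
def gB (k : Nat) : Int :=
  if k ≤ 6 then (k : Int) else max (3 * gB (k - 4)) (4 * gB (k - 5))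
termination_by k
decreasing_by all_goals omega

theorem gB_le6 {k : Nat} (h : k ≤ 6) : gB k = (k : Int) := by
  rw [gB]; simp [h]

theorem gB_rec {k : Nat} (h : 7 ≤ k) : gB k = max (3 * gB (k - 4)) (4 * gB (k - 5)) := by
  rw [gB]; simp [Nat.not_le.mpr (by omega : 6 < k)]

theorem gB7 : gB 7 = 9 := by rw [gB_rec (by norm_num)]; norm_num [gB_le6]
theorem gB8 : gB 8 = 12 := by rw [gB_rec (by norm_num)]; norm_num [gB_le6]
theorem gB9 : gB 9 = 16 := by rw [gB_rec (by norm_num)]; norm_num [gB_le6]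
theorem gB10 : gB 10 = 20 := by rw [gB_rec (by norm_num)]; norm_num [gB_le6]
theorem gB11 : gB 11 = 27 := by rw [gB_rec (by norm_num)]; norm_num [gB_le6, gB7]

theorem gB_I1 (j : Nat) (h1 : 1 ≤ j) : 4 * gB j ≤ gB (j + 5) := by
  induction j using Nat.strong_induction_on with
  | _ j ih =>
    by_cases h : j ≤ 6
    · interval_cases j <;> norm_num [gB_le6, gB7, gB8, gB9, gB10, gB11]
    · have h7 : 7 ≤ j := by omega
      have e1 : j + 5 - 4 = j - 4 + 5 := by omega
      have e2 : j + 5 - 5 = j - 5 + 5 := by omega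
      rw [gB_rec (by omega : 7 ≤ j + 5), gB_rec h7, e1, e2]
      have ih1 := ih (j - 4) (by omega) (by omega)
      have ih2 := ih (j - 5) (by omega) (by omega)
      omega

theorem gB_I3 (j : Nat) (h1 : 1 ≤ j) : 2 * gB j ≤ gB (j + 3) := by
  induction j using Nat.strong_induction_on with
  | _ j ih =>
    by_cases h : j ≤ 6
    · interval_cases j <;> norm_num [gB_le6, gB7, gB8, gB9]
    · have h7 : 7 ≤ j := by omega
      have e1 : j + 3 - 4 = j - 4 + 3 := by omega
      have e2 : j + 3 - 5 = j - 5 + 3 := by omega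
      rw [gB_rec (by omega : 7 ≤ j + 3), gB_rec h7, e1, e2]
      have ih1 := ih (j - 4) (by omega) (by omega)
      have ih2 := ih (j - 5) (by omega) (by omega)
      omega

theorem gB_I4 (j : Nat) (h1 : 4 ≤ j) : 2 * gB (j + 1) ≤ 3 * gB j := by
  induction j using Nat.strong_induction_on with
  | _ j ih =>
    by_cases h : j ≤ 8
    · interval_cases j <;> norm_num [gB_le6, gB7, gB8, gB9]
    · have h7 : 9 ≤ j := by omega
      have e1 : j + 1 - 4 = j - 4 + 1 := by omega
      have e2 : j + 1 - 5 = j - 5 + 1 := by omega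
      rw [gB_rec (by omega : 7 ≤ j + 1), gB_rec (by omega : 7 ≤ j), e1, e2]
      have ih1 := ih (j - 4) (by omega) (by omega)
      have ih2 := ih (j - 5) (by omega) (by omega)
      omega

theorem gB_I2 (j : Nat) (h1 : 1 ≤ j) :
    5 * gB j ≤ max (3 * gB (j + 2)) (4 * gB (j + 1)) := by
  induction j using Nat.strong_induction_on with
  | _ j ih =>
    by_cases h : j ≤ 6
    · interval_cases j <;> norm_num [gB_le6, gB7, gB8]
    · have h7 : 7 ≤ j := by omega
      have e1 : j + 2 - 4 = j - 4 + 2 := by omega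
      have e2 : j + 2 - 5 = j - 5 + 2 := by omega
      have e3 : j + 1 - 4 = j - 4 + 1 := by omega
      have e4 : j + 1 - 5 = j - 5 + 1 := by omega
      have e5 : j - 4 + 2 = j - 2 := by omega
      have e6 : j - 4 + 1 = j - 3 := by omega
      have e7 : j - 5 + 2 = j - 3 := by omega
      have e8 : j - 5 + 1 = j - 4 := by omega
      rw [gB_rec (by omega : 7 ≤ j + 2), gB_rec (by omega : 7 ≤ j + 1), gB_rec h7, e1, e2, e3, e4, e5, e6, e7, e8]
      have ih1 := ih (j - 4) (by omega) (by omega)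
      have ih2 := ih (j - 5) (by omega) (by omega)
      rw [e5, e6] at ih1
      rw [e7, e8] at ih2
      omega

theorem gB_nonneg (k : Nat) : 0 ≤ gB k := by
  induction k using Nat.strong_induction_on with
  | _ k ih =>
    by_cases h : k ≤ 6
    · rw [gB_le6 h]; exact_mod_cast Nat.zero_le k
    · rw [gB_rec (by omega)]
      have := ih (k - 4) (by omega)
      have := ih (k - 5) (by omega)
      omega

theorem term_le (i : Nat) (h7 : 7 ≤ i) :
    ∀ d j : Nat, 1 ≤ j → j + 3 ≤ i → i - j ≤ d →
      gB j * ((i : Int) - j - 1) ≤ max (3 * gB (i - 4)) (4 * gB (i - 5)) := by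
  intro d
  induction d with
  | zero => intro j _ h3 hd; omega
  | succ d ihd =>
    intro j hj1 hj3 hd
    by_cases hcase : i - j ≤ d
    · exact ihd j hj1 hj3 hcase
    · have hk : i - j = d + 1 := by omega
      by_cases h3 : i - j = 3
      · -- j = i - 3, factor 2
        have hm : (i : Int) - j - 1 = 2 := by omega
        rw [hm]
        by_cases hi7 : i = 7
        · have hj4 : j = 4 := by omega
          subst hi7; subst hj4
          norm_num [gB_le6]
        · have h4 := gB_I4 (i - 4) (by omega)
          have e : i - 4 + 1 = j := by omega
          rw [e] at h4
          omega
      · by_cases h4 : i - j = 4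
        · have hm : (i : Int) - j - 1 = 3 := by omega
          have e : j = i - 4 := by omega
          rw [hm, e]; omega
        · by_cases h5 : i - j = 5
          · have hm : (i : Int) - j - 1 = 4 := by omega
            have e : j = i - 5 := by omega
            rw [hm, e]; omega
          · by_cases h6 : i - j = 6
            · have hm : (i : Int) - j - 1 = 5 := by omega
              have h2 := gB_I2 j hj1
              have e1 : j + 2 = i - 4 := by omega
              have e2 : j + 1 = i - 5 := by omega
              rw [e1, e2] at h2
              rw [hm]; omega
            · by_cases h7' : i - j = 7
              · have hm : (i : Int) - j - 1 = 6 := by omega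
                have h3' := gB_I3 j hj1
                have e1 : j + 3 = i - 4 := by omega
                rw [e1] at h3'
                rw [hm]; omega
              · by_cases h8 : i - j = 8
                · have hm : (i : Int) - j - 1 = 7 := by omega
                  have h3' := gB_I3 j hj1
                  have e1 : j + 3 = i - 5 := by omega
                  rw [e1] at h3'
                  have hnn := gB_nonneg j
                  rw [hm]; omega
                · -- i - j ≥ 9 : reduce to j + 5
                  have hk9 : 9 ≤ i - j := by omega
                  have hI1 := gB_I1 j hj1
                  have hnn := gB_nonneg j
                  have hrec := ihd (j + 5) (by omega) (by omega) (by omega)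
                  have hm5 : ((i : Int) - ((j : Nat) + 5 : Nat) - 1) = (i : Int) - j - 6 := by push_cast; ring
                  rw [hm5] at hrec
                  have hstep : gB j * ((i : Int) - j - 1) ≤ gB (j + 5) * ((i : Int) - j - 6) := by
                    have hmge : ((i : Int) - j - 1) ≤ 4 * ((i : Int) - j - 6) := by omega
                    have hfge : (0 : Int) ≤ (i : Int) - j - 6 := by omega
                    nlinarith [hI1, hnn, hmge, hfge]
                  exact le_trans hstep hrec

theorem foldl_max_le_int' {α : Type} (xs : List α) (f : α → Int) (init M : Int)
    (h0 : init ≤ M) (h : ∀ x ∈ xs, f x ≤ M) :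
    xs.foldl (fun acc y => max acc (f y)) init ≤ M := by
  induction xs generalizing init with
  | nil => exact h0
  | cons x t ih =>
      simp only [List.foldl_cons]
      exact ih _ (max_le h0 (h x List.mem_cons_self)) (fun y hy => h y (List.mem_cons_of_mem _ hy))

theorem inner_max_eq (i : Nat) (h7 : 7 ≤ i) :
    (PySem.List.pyRange ((i : Int) - 3) 0 (-1)).foldl
      (fun acc j => max acc (gB j.toNat * ((i : Int) - j - 1))) 0 = gB i := by
  have hM4 := gB_nonneg (i - 4)
  have hM5 := gB_nonneg (i - 5)
  apply le_antisymm
  · rw [gB_rec h7]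
    apply foldl_max_le_int' _ (fun j => gB j.toNat * ((i : Int) - j - 1)) 0 _ (by omega)
    intro j hj
    rw [PySem.List.mem_pyRange_neg_one] at hj
    have hj0 : 0 < j := hj.1
    have hj3 : j ≤ (i : Int) - 3 := hj.2
    have hjn : (j.toNat : Int) = j := Int.toNat_of_nonneg (by omega)
    have := term_le i h7 i j.toNat (by omega) (by omega) (by omega)
    rw [hjn] at this
    exact this
  · have hL := (PySem.List.le_foldl_max_int (PySem.List.pyRange ((i : Int) - 3) 0 (-1))
      (fun j => gB j.toNat * ((i : Int) - j - 1)) 0).2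
    have h4 := hL ((i : Int) - 4) (by
      rw [PySem.List.mem_pyRange_neg_one]; constructor <;> omega)
    have h5 := hL ((i : Int) - 5) (by
      rw [PySem.List.mem_pyRange_neg_one]; constructor <;> omega)
    have e4 : ((i : Int) - 4).toNat = i - 4 := by omega
    have e5 : ((i : Int) - 5).toNat = i - 5 := by omega
    simp only [e4, e5] at h4 h5
    have c4 : (i : Int) - ((i : Int) - 4) - 1 = 3 := by ring
    have c5 : (i : Int) - ((i : Int) - 5) - 1 = 4 := by ring
    rw [c4] at h4
    rw [c5] at h5
    rw [gB_rec h7]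
    omega

theorem inner_shape (i : Int) (iN : Nat) (hi : i = (iN : Int)) :
    ∀ (js : List Int) (dp : List Int), iN < dp.length →
      (∀ j ∈ js, 0 ≤ j ∧ j < (iN : Int)) →
      js.foldl (fun dp j =>
        let curr := PySem.List.pyGetD dp j 0 * (i - j - 1)
        PySem.List.pySetD dp i (max (PySem.List.pyGetD dp i 0) curr)) dp
      = dp.set iN (js.foldl (fun acc j => max acc (PySem.List.pyGetD dp j 0 * (i - j - 1)))
          (PySem.List.pyGetD dp i 0)) := by
  intro js
  induction js with
  | nil =>
    intro dp hlen _
    simp only [List.foldl_nil]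
    subst hi
    rw [PySem.List.pyGetD_natCast, List.getD_eq_getElem?_getD, List.getElem?_eq_getElem hlen]
    simp [List.set_getElem_self]
  | cons j js ih =>
    intro dp hlen hmem
    obtain ⟨hj0, hjlt⟩ := hmem j List.mem_cons_self
    have hmem' : ∀ x ∈ js, 0 ≤ x ∧ x < (iN : Int) := fun x hx => hmem x (List.mem_cons_of_mem _ hx)
    simp only [List.foldl_cons]
    set v := max (PySem.List.pyGetD dp i 0) (PySem.List.pyGetD dp j 0 * (i - j - 1)) with hv
    have hset : (PySem.List.pySetD dp i v) = dp.set iN v := by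
      rw [hi, PySem.List.pySetD_natCast]
    rw [hset] at *
    have hlen' : iN < (dp.set iN v).length := by simpa using hlen
    rw [ih (dp.set iN v) hlen' hmem', List.set_set]
    have hget_i : PySem.List.pyGetD (dp.set iN v) i 0 = v := by
      rw [hi, PySem.List.pyGetD_natCast]
      simp [List.getD_eq_getElem?_getD, hlen]
    have hget_ne : ∀ x ∈ js, PySem.List.pyGetD (dp.set iN v) x 0 = PySem.List.pyGetD dp x 0 := by
      intro x hx
      obtain ⟨hx0, hxlt⟩ := hmem' x hx
      have hxn : x = ((x.toNat : Nat) : Int) := (Int.toNat_of_nonneg hx0).symm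
      rw [hxn, PySem.List.pyGetD_natCast, PySem.List.pyGetD_natCast]
      have : x.toNat ≠ iN := by omega
      simp [List.getD_eq_getElem?_getD, Ne.symm this]
    rw [hget_i]
    congr 1
    exact PySem.List.foldl_congr_mem _ _ _ _ (fun acc x hx => by rw [hget_ne x hx])

def dpInv (N i : Nat) (dp : List Int) : Prop :=
  dp.length = N + 1 ∧ ∀ k : Nat, k ≤ N → dp.getD k 0 = if k < i then gB k else 0

theorem outer_step (N iN : Nat) (h7 : 7 ≤ iN) (hN : iN ≤ N) (dp : List Int)
    (hInv : dpInv N iN dp) :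
    dpInv N (iN + 1)
      ((PySem.List.pyRange (((iN : Nat) : Int) - 3) 0 (-1)).foldl
        (fun dp j =>
          let curr := PySem.List.pyGetD dp j 0 * (((iN : Nat) : Int) - j - 1)
          PySem.List.pySetD dp ((iN : Nat) : Int)
            (max (PySem.List.pyGetD dp ((iN : Nat) : Int) 0) curr)) dp) := by
  obtain ⟨hlen, hval⟩ := hInv
  have hlen' : iN < dp.length := by omega
  rw [inner_shape ((iN : Nat) : Int) iN rfl _ dp hlen'
    (by intro j hj; rw [PySem.List.mem_pyRange_neg_one] at hj; exact ⟨by omega, by omega⟩)]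
  have hinit : PySem.List.pyGetD dp ((iN : Nat) : Int) 0 = 0 := by
    rw [PySem.List.pyGetD_natCast, hval iN (by omega)]
    simp
  have hreads : ∀ (acc : Int), ∀ j ∈ PySem.List.pyRange (((iN : Nat) : Int) - 3) 0 (-1),
      max acc (PySem.List.pyGetD dp j 0 * (((iN : Nat) : Int) - j - 1))
        = max acc (gB j.toNat * (((iN : Nat) : Int) - j - 1)) := by
    intro acc j hj
    rw [PySem.List.mem_pyRange_neg_one] at hj
    have hj0 : (0 : Int) < j := hj.1
    have hj3 : j ≤ ((iN : Nat) : Int) - 3 := hj.2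
    have hxn : j = ((j.toNat : Nat) : Int) := (Int.toNat_of_nonneg (by omega)).symm
    rw [hxn, PySem.List.pyGetD_natCast, hval j.toNat (by omega)]
    rw [if_pos (by omega), Int.toNat_natCast]
  rw [hinit, PySem.List.foldl_congr_mem _ _ _ _ hreads, inner_max_eq iN h7]
  constructor
  · simp [hlen]
  · intro k hk
    by_cases hki : k = iN
    · subst hki
      simp [List.getD_eq_getElem?_getD, hlen']
    · rw [List.getD_eq_getElem?_getD, List.getElem?_set_ne (by omega),
        ← List.getD_eq_getElem?_getD, hval k hk]
      by_cases hlt : k < iN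
      · rw [if_pos hlt, if_pos (by omega)]
      · rw [if_neg hlt, if_neg (by omega)]

theorem outerA (N : Nat) (dp0 : List Int) (h0 : dpInv N 7 dp0) :
    ∀ m : Nat, 7 + m ≤ N + 1 →
      dpInv N (7 + m)
        ((PySem.List.pyRange 7 (7 + (m : Int)) 1).foldl
          (fun dp i =>
            (PySem.List.pyRange (i - 3) 0 (-1)).foldl (fun dp j =>
              let curr := PySem.List.pyGetD dp j 0 * (i - j - 1)
              PySem.List.pySetD dp i (max (PySem.List.pyGetD dp i 0) curr)) dp) dp0) := by
  intro m
  induction m with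
  | zero =>
    intro _
    rw [show (7 + ((0 : Nat) : Int)) = 7 by norm_num, PySem.List.pyRange_one_eq_nil le_rfl]
    exact h0
  | succ m ihm =>
    intro hm
    have hb : (7 + ((m + 1 : Nat) : Int)) = (7 + (m : Int)) + 1 := by push_cast; ring
    rw [hb, PySem.List.pyRange_one_succ_right (by omega), List.foldl_append,
      List.foldl_cons, List.foldl_nil]
    have hc : (7 + (m : Int)) = ((7 + m : Nat) : Int) := by push_cast; ring
    rw [hc]
    have := outer_step N (7 + m) (by omega) (by omega) _ (ihm (by omega))
    rw [show 7 + (m + 1) = (7 + m) + 1 by omega]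
    exact this

theorem portA_eq (n : Int) (h : ¬ n ≤ 6) : optimalKeys n = gB n.toNat := by
  have h7 : (7 : Int) ≤ n := by omega
  simp only [optimalKeys, if_neg h]
  have hrange16 : PySem.List.pyRange 1 7 1 = [1, 2, 3, 4, 5, 6] := by decide
  rw [hrange16]
  simp only [List.foldl_cons, List.foldl_nil]
  set N := n.toNat with hN
  have hn : n = (N : Int) := by omega
  have hrep : (n + 1).toNat = N + 1 := by omega
  rw [hrep]
  set dpInit : List Int :=
    (((((((List.replicate (N + 1) 0).set 1 1).set 2 2).set 3 3).set 4 4).set 5 5).set 6 6) with hdpInit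
  have hset6 : (PySem.List.pySetD (PySem.List.pySetD (PySem.List.pySetD (PySem.List.pySetD
      (PySem.List.pySetD (PySem.List.pySetD (List.replicate (N + 1) (0 : Int)) 1 1) 2 2) 3 3)
      4 4) 5 5) 6 6) = dpInit := by
    simp [PySem.List.pySetD_of_nonneg, hdpInit]
  rw [hset6]
  rw [hn]
  have h7N : 7 ≤ N := by omega
  have h0 : dpInv N 7 dpInit := by
    constructor
    · simp [hdpInit]
    · intro k hk
      have hklen : k < N + 1 := by omega
      by_cases h6 : k ≤ 6
      · interval_cases k <;>
          simp [hdpInit, List.getD_eq_getElem?_getD,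
            gB_le6, show 0 < N by omega, show 2 ≤ N by omega,
            show 3 ≤ N by omega, show 4 ≤ N by omega, show 5 ≤ N by omega,
            show 6 ≤ N by omega]
      · have hx : ∀ j : Nat, j ≤ 6 → j ≠ k := by omega
        simp [hdpInit, List.getD_eq_getElem?_getD,
          hklen, hx 1 (by omega), hx 2 (by omega), hx 3 (by omega),
          hx 4 (by omega), hx 5 (by omega), hx 6 (by omega), if_neg (by omega : ¬ k < 7)]
  have hmain := outerA N dpInit h0 (N - 6) (by omega)
  have hb : (7 + ((N - 6 : Nat) : Int)) = (N : Int) + 1 := by omega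
  rw [hb] at hmain
  have hidx : 7 + (N - 6) = N + 1 := by omega
  rw [hidx] at hmain
  obtain ⟨hlenF, hvalF⟩ := hmain
  rw [PySem.List.pyGetD_natCast, hvalF N le_rfl, if_pos (by omega)]

theorem portB_window (m : Nat) :
    (PySem.List.pyRange 7 (7 + (m : Int)) 1).foldl
      (fun (s : Int × Int × Int × Int × Int) _ =>
        match s with
        | (a, b, c, d, e) => (b, c, d, e, max (3 * b) (4 * a)))
      (2, 3, 4, 5, 6)
    = (gB (m + 2), gB (m + 3), gB (m + 4), gB (m + 5), gB (m + 6)) := by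
  induction m with
  | zero =>
    rw [show (7 + ((0 : Nat) : Int)) = 7 by norm_num, PySem.List.pyRange_one_eq_nil le_rfl]
    norm_num [gB_le6]
  | succ m ihm =>
    have hb : (7 + ((m + 1 : Nat) : Int)) = (7 + (m : Int)) + 1 := by push_cast; ring
    rw [hb, PySem.List.pyRange_one_succ_right (by omega), List.foldl_append,
      List.foldl_cons, List.foldl_nil, ihm]
    have e4 : m + 1 + 6 = m + 7 := by omega
    have hrec : gB (m + 7) = max (3 * gB (m + 3)) (4 * gB (m + 2)) := by
      rw [gB_rec (by omega), show m + 7 - 4 = m + 3 by omega, show m + 7 - 5 = m + 2 by omega]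
    simp only []
    rw [e4, hrec]

theorem portB_eq (n : Int) (h : ¬ n ≤ 6) : optimalKeys_alt n = gB n.toNat := by
  set N := n.toNat with hN
  have hn : n = (N : Int) := by omega
  have h7N : 7 ≤ N := by omega
  simp only [optimalKeys_alt, if_neg h]
  rw [hn]
  have hw := portB_window (N - 6)
  have hb : (7 + ((N - 6 : Nat) : Int)) = (N : Int) + 1 := by omega
  rw [hb] at hw
  rw [hw, show N - 6 + 6 = N by omega]

-- ===== VERDICT (by name: the statement is the Claim_ definition above) =====
theorem optimalKeys_spec : Claim_equal_optimalKeys := by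
  intro n _
  unfold Spec_optimalKeys
  by_cases h : n ≤ 6
  · simp [optimalKeys, optimalKeys_alt, h]
  · rw [portA_eq n h, portB_eq n h]
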